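-- pv_equiv track=rewrite | github.com/jeffbulltech/cosmere_api | backend/scripts/merge_data_sources.py | guess_world_from_categories
-- ===== SOURCE A (Python) =====
-- from typing import Dict, List
--
-- def guess_world_from_categories(categories: List[str]) -> str:
--     """Guess world based on wiki categories"""
--     for category in categories:
--         if 'Roshar' in category or 'Stormlight' in category:
--             return 'roshar'
--         elif 'Scadrial' in category or 'Mistborn' in category:
--             return 'scadrial'
--         elif 'Nalthis' in category or 'Warbreaker' in category:
--             return 'nalthis'
--     return None
-- ===== SOURCE B (Python) =====
-- WORLD_TABLE = [
--     (('Roshar', 'Stormlight'), 'roshar'),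
--     (('Scadrial', 'Mistborn'), 'scadrial'),
--     (('Nalthis', 'Warbreaker'), 'nalthis'),
-- ]
--
-- def guess_world_from_categories(categories):
--     # One staged pass per world: index of its first matching category (len = no match),
--     # then the lexicographic minimum of (index, priority) decides the answer.
--     n = len(categories)
--     candidates = [
--         (next((i for i, c in enumerate(categories) if any(k in c for k in kws)), n), p, world)
--         for p, (kws, world) in enumerate(WORLD_TABLE)
--     ]
--     idx, _p, world = min(candidates)
--     return world if idx < n else None
-- ===== Notes on version B (the rewrite author's own statement) =====
-- stated objective: alternative
-- what changed: Instead of a single pass with an elif chain, B computes per-world first-match indices in staged passes and returns the world with the lexicographically minimal (index, priority) tuple.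
import Mathlib
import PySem

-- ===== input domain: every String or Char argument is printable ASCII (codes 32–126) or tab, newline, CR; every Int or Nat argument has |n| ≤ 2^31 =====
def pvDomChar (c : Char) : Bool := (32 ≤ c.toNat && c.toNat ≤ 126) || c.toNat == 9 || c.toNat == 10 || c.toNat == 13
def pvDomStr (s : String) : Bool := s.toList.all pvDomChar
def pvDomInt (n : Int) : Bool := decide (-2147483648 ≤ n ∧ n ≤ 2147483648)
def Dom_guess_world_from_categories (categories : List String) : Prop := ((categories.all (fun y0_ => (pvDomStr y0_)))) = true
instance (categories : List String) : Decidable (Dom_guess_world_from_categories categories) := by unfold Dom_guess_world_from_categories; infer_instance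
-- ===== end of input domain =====

-- B replaces A's single-pass elif chain by per-world first-match indices combined with a
-- lexicographic (index, priority) minimum (alternative algorithm, same cost).

-- ===== PORT A =====
def guess_world_from_categories (categories : List String) : Option String :=
  match categories with
  | [] => none
  | category :: rest =>
    if PySem.Str.isIn "Roshar" category || PySem.Str.isIn "Stormlight" category then
      some "roshar"
    else if PySem.Str.isIn "Scadrial" category || PySem.Str.isIn "Mistborn" category then
      some "scadrial"
    else if PySem.Str.isIn "Nalthis" category || PySem.Str.isIn "Warbreaker" category then
      some "nalthis"
    else
      guess_world_from_categories rest

-- ===== PORT B =====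
def WORLD_TABLE : List (List String × String) :=
  [(["Roshar", "Stormlight"], "roshar"),
   (["Scadrial", "Mistborn"], "scadrial"),
   (["Nalthis", "Warbreaker"], "nalthis")]

-- index of the first category any of whose keywords matches; sentinel = length (Source B's `next(..., n)`)
def firstMatch (kws : List String) (cats : List String) : Nat :=
  match cats with
  | [] => 0
  | c :: rest =>
    if kws.any (fun k => PySem.Str.isIn k c) then 0 else firstMatch kws rest + 1

-- Python's `min` on the candidate tuples: keep the lexicographically smaller,
-- first one on ties (priorities are distinct, so the string is never consulted)
def candMin (best cand : Nat × Int × String) : Nat × Int × String :=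
  if cand.1 < best.1 ∨ (cand.1 = best.1 ∧ cand.2.1 < best.2.1) then cand else best

def guess_world_from_categories_alt (categories : List String) : Option String :=
  let n := categories.length
  let candidates := (PySem.List.enumerate WORLD_TABLE).map
    (fun pe => (firstMatch pe.2.1 categories, pe.1, pe.2.2))
  match candidates with
  | [] => none
  | c :: cs =>
    let m := cs.foldl candMin c
    if m.1 < n then some m.2.2 else none

-- ===== PRECONDITION & SPEC =====
def Spec_guess_world_from_categories (categories : List String) (out : Option String) : Prop := out = guess_world_from_categories_alt categories
instance (categories : List String) (out : Option String) : Decidable (Spec_guess_world_from_categories categories out) := by unfold Spec_guess_world_from_categories; infer_instance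

-- ===== CLAIM (what is proved, stated in full; the proofs are below) =====
def Claim_equal_guess_world_from_categories : Prop := ∀ (categories : List String), Dom_guess_world_from_categories categories → Spec_guess_world_from_categories categories (guess_world_from_categories categories)

-- ===== LEMMAS AND PROOFS =====

-- B's selection step, abstracted over the three indices and the length
def pick (a b c n : Nat) : Option String :=
  let m := candMin (candMin (a, 0, "roshar") (b, 1, "scadrial")) (c, 2, "nalthis")
  if m.1 < n then some m.2.2 else none

theorem alt_eq_pick (cats : List String) :
    guess_world_from_categories_alt cats =
      pick (firstMatch ["Roshar", "Stormlight"] cats)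
           (firstMatch ["Scadrial", "Mistborn"] cats)
           (firstMatch ["Nalthis", "Warbreaker"] cats) cats.length := by
  simp [guess_world_from_categories_alt, WORLD_TABLE, PySem.List.enumerate, pick, List.foldl]

theorem pick_shift (a b c n : Nat) : pick (a+1) (b+1) (c+1) (n+1) = pick a b c n := by
  simp only [pick, candMin]
  split_ifs <;> simp_all <;> omega

theorem pick_a (b c n : Nat) (hn : 0 < n) : pick 0 b c n = some "roshar" := by
  simp only [pick, candMin]
  split_ifs <;> simp_all <;> omega

theorem pick_b (a c n : Nat) (hn : 0 < n) (ha : 0 < a) : pick a 0 c n = some "scadrial" := by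
  simp only [pick, candMin]
  split_ifs <;> simp_all <;> omega

theorem pick_c (a b n : Nat) (hn : 0 < n) (ha : 0 < a) (hb : 0 < b) :
    pick a b 0 n = some "nalthis" := by
  simp only [pick, candMin]
  split_ifs <;> simp_all <;> omega

theorem guess_eq (cats : List String) :
    guess_world_from_categories cats = guess_world_from_categories_alt cats := by
  induction cats with
  | nil => rfl
  | cons category rest ih =>
    rw [alt_eq_pick]
    simp only [guess_world_from_categories, firstMatch, List.any_cons, List.any_nil,
      Bool.or_false, List.length_cons]
    by_cases h1 : (PySem.Str.isIn "Roshar" category || PySem.Str.isIn "Stormlight" category) = true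
    · simp only [if_pos h1]
      rw [pick_a _ _ _ (Nat.succ_pos _)]
    · simp only [if_neg h1]
      by_cases h2 : (PySem.Str.isIn "Scadrial" category || PySem.Str.isIn "Mistborn" category) = true
      · simp only [if_pos h2]
        rw [pick_b _ _ _ (Nat.succ_pos _) (Nat.succ_pos _)]
      · simp only [if_neg h2]
        by_cases h3 : (PySem.Str.isIn "Nalthis" category || PySem.Str.isIn "Warbreaker" category) = true
        · simp only [if_pos h3]
          rw [pick_c _ _ _ (Nat.succ_pos _) (Nat.succ_pos _) (Nat.succ_pos _)]
        · simp only [if_neg h3]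
          rw [pick_shift, ih, alt_eq_pick]

-- ===== VERDICT (by name: the statement is the Claim_ definition above) =====
theorem guess_world_from_categories_spec : Claim_equal_guess_world_from_categories := by
  intro categories _
  exact guess_eq categories
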